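-- pv_equiv track=rewrite | github.com/tlian25/kickstart_2022 | session_1/milktea/milktea_solution2.py | count_complaints
-- ===== SOURCE A (Python) =====
-- class ScoredTea:
--
--     def __init__(self, score:int, tea:str):
--         self.score = score
--         self.tea = tea
--
--
--     def __eq__(self, other):
--         return self.score == other.score
--
--     def __lt__ (self, other):
--         return self.score < other.score
--
--     def __repr__(self):
--         return f"({self.tea},{self.score})"
--
-- def buildScores(teas):
--
--     # scores[i] = [#of0s, #of1s] at i-th position across all teas
--     scores = [[0, 0] for _ in range(len(teas[0]))]
--
--     for i in range(len(scores)):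
--         for t in teas:
--             if t[i] == '0':
--                 scores[i][0] += 1
--             else:
--                 scores[i][1] += 1
--
--     return scores
--
-- def expand(scoredteas:list, prevTea:str, teas:list, scores:list):
--     zero = prevTea.tea + '0'
--     one = prevTea.tea + '1'
--     i = len(zero)-1
--
--     scoredteas.append(ScoredTea(prevTea.score + scores[i][1], zero))
--     scoredteas.append(ScoredTea(prevTea.score + scores[i][0], one))
--
-- def count_complaints(teas, forbiddens):
--
--     L = len(teas[0])
--     forbiddens = set(forbiddens)
--
--     scores = buildScores(teas)
--
--
--     queue = [ ScoredTea(0, "") ]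
--
--     # Loop L times for length of tea string
--     for _ in range(L):
--
--         next = []
--
--         for t in queue:
--             expand(next, t, teas, scores)
--
--         next.sort()
--         queue = next[:len(forbiddens)+1]
--
--
--     # Find lowest score not in forbidden
--     for t in queue:
--         if t.tea not in forbiddens:
--             return t.score
-- ===== SOURCE B (Python) =====
-- # B: keeps the beam sorted and replaces A's per-level sort of the doubled beam by a
-- # linear stable merge of the two already-sorted halves; column counts via comprehensions.
--
-- def _merge(xs, ys):
--     # stable merge of two score-sorted lists; on a tie the element of xs goes first
--     out = []
--     i = j = 0
--     while i < len(xs) and j < len(ys):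
--         if xs[i][0] <= ys[j][0]:
--             out.append(xs[i]); i += 1
--         else:
--             out.append(ys[j]); j += 1
--     out.extend(xs[i:])
--     out.extend(ys[j:])
--     return out
--
-- def count_complaints(teas, forbiddens):
--     L = len(teas[0])
--     n = len(teas)
--     forb = set(forbiddens)
--     cap = len(forb) + 1
--     zeros = [sum(1 for t in teas if t[i] == '0') for i in range(L)]
--     queue = [(0, "")]            # invariant: sorted by score
--     for i in range(L):
--         c0 = zeros[i]
--         a = n - c0               # complaints added by choosing '0' at position i
--         b = c0                   # complaints added by choosing '1'
--         zs = [(s + a, t + '0') for s, t in queue]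
--         os_ = [(s + b, t + '1') for s, t in queue]
--         if a == b:
--             # equal deltas: the interleaved expansion is already sorted
--             merged = [p for pair in zip(zs, os_) for p in pair]
--         elif a < b:
--             # tied scores must come from the costlier side (earlier parents) first
--             merged = _merge(os_, zs)
--         else:
--             merged = _merge(zs, os_)
--         queue = merged[:cap]
--     for s, t in queue:
--         if t not in forb:
--             return s
-- ===== Notes on version B (the rewrite author's own statement) =====
-- stated objective: alternative
-- what changed: B keeps the beam sorted as an invariant and replaces A's per-level stable sort of the doubled beam by a linear stable merge of the two already-sorted halves (tie rule derived from sort stability; when both per-position deltas are equal the interleaved expansion is emitted as-is), and computes the per-column zero-counts by comprehensions instead of a mutated score matrix.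
import Mathlib
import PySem

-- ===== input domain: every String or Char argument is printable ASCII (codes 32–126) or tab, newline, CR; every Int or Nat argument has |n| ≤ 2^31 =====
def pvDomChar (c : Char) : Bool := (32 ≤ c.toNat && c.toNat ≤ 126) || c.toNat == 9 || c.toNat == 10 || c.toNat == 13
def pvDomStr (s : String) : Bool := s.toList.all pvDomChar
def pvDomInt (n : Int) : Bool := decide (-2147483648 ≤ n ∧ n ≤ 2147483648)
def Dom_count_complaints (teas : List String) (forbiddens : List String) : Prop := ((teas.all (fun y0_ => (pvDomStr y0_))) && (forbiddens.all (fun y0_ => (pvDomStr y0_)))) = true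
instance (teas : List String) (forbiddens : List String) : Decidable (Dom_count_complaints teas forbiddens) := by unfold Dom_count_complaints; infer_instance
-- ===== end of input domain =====

-- B keeps the beam sorted and replaces A's per-level stable sort of the doubled beam
-- by a linear stable merge of the two already-sorted halves (objective: alternative).


-- ===== PORT A =====
-- buildScores' inner 'for t in teas' loop at column i ('t[i] == "0"'; an out-of-range
-- read is an IndexError in Python — those inputs are excluded by Pre_).
def pvScoresCellA (teas : List String) (i : Int) : Int × Int :=
  teas.foldl
    (fun p t => if PySem.Str.pyGet? t i = some '0' then (p.1 + 1, p.2) else (p.1, p.2 + 1))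
    (0, 0)

-- buildScores: 'for i in range(len(scores))' fills cell i independently.
def pvBuildScoresA (teas : List String) : List (Int × Int) :=
  (PySem.List.pyRange 0 (((teas.headD "").toList.length : Int))).map (pvScoresCellA teas)

-- expand: appends the '0'- and '1'-extension of prevTea (tea strings as char lists);
-- scores[i] is always in range when called from count_complaints.
def pvExpandA (scores : List (Int × Int)) (acc : List (Int × List Char)) (t : Int × List Char) :
    List (Int × List Char) :=
  let zero := t.2 ++ ['0']
  let one := t.2 ++ ['1']
  let i : Int := (zero.length : Int) - 1
  let sc := (PySem.List.pyGet? scores i).getD (0, 0)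
  acc ++ [(t.1 + sc.2, zero), (t.1 + sc.1, one)]

-- count_complaints: L levels; each level expands the queue, stable-sorts it by score
-- and keeps the first len(set(forbiddens))+1 entries; finally returns the score of the
-- first kept tea not in the forbidden set.  Python returns None when the scan falls
-- through and raises IndexError on teas == [] / short teas — excluded by Pre_; the
-- port returns the junk value 0 there.
def count_complaints (teas : List String) (forbiddens : List String) : Int :=
  let L := (teas.headD "").toList.length
  let forb := PySem.Set.ofList (forbiddens.map String.toList)
  let scores := pvBuildScoresA teas
  let queue := (List.range L).foldl
    (fun queue _i =>
      let next := queue.foldl (fun acc t => pvExpandA scores acc t) []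
      (PySem.List.sorted next (fun st => st.1)).take (forb.length + 1))
    [((0 : Int), ([] : List Char))]
  ((queue.find? (fun st => !(forb.contains st.2))).map (fun st => st.1)).getD 0

-- ===== PORT B =====
-- _merge: stable merge of two score-sorted lists; on a tie the element of xs goes first.
def pvMergeB : List (Int × List Char) → List (Int × List Char) → List (Int × List Char)
  | [], ys => ys
  | x :: xs, [] => x :: xs
  | x :: xs, y :: ys =>
    if x.1 ≤ y.1 then x :: pvMergeB xs (y :: ys) else y :: pvMergeB (x :: xs) ys
termination_by xs ys => xs.length + ys.length

-- B: per-column zero-counts once; the beam stays sorted, each level is built by a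
-- linear stable merge of the two sorted halves (or, for equal deltas, the interleaved
-- expansion, which is already sorted); same final scan as A.
def count_complaints_alt (teas : List String) (forbiddens : List String) : Int :=
  let L := (teas.headD "").toList.length
  let n : Int := teas.length
  let forb := PySem.Set.ofList (forbiddens.map String.toList)
  let cap := forb.length + 1
  let zeros : List Int :=
    (List.range L).map (fun (i : Nat) => (teas.countP (fun t => PySem.Str.pyGet? t (i : Int) == some '0') : Int))
  let queue := (List.range L).foldl
    (fun (queue : List (Int × List Char)) (i : Nat) =>
      let c0 := (PySem.List.pyGet? zeros (i : Int)).getD 0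
      let a := n - c0
      let b := c0
      let zs := queue.map (fun st => (st.1 + a, st.2 ++ ['0']))
      let os := queue.map (fun st => (st.1 + b, st.2 ++ ['1']))
      let merged :=
        if a = b then (zs.zip os).flatMap (fun p => [p.1, p.2])
        else if a < b then pvMergeB os zs
        else pvMergeB zs os
      merged.take cap)
    [((0 : Int), ([] : List Char))]
  ((queue.find? (fun st => !(forb.contains st.2))).map (fun st => st.1)).getD 0

-- ===== PRECONDITION & SPEC =====
-- Pre_ excludes exactly the inputs on which Python A does not return an int: teas == []
-- or some tea shorter than teas[0] (IndexError), and inputs whose forbiddens contain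
-- every binary string of length len(teas[0]), where A's final scan falls through and
-- returns None.
def Pre_count_complaints (teas : List String) (forbiddens : List String) : Prop :=
  teas ≠ [] ∧
  (∀ t ∈ teas, (teas.headD "").toList.length ≤ t.toList.length) ∧
  (PySem.Set.ofList ((forbiddens.filter (fun s =>
      s.toList.length == (teas.headD "").toList.length &&
      s.toList.all (fun c => c == '0' || c == '1'))).map String.toList)).length
    < 2 ^ (teas.headD "").toList.length
instance (teas : List String) (forbiddens : List String) : Decidable (Pre_count_complaints teas forbiddens) := by
  unfold Pre_count_complaints; infer_instance

def pvWitness_count_complaints : List String × List String := (["01", "11"], ["01"])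

def Spec_count_complaints (teas : List String) (forbiddens : List String) (out : Int) : Prop := out = count_complaints_alt teas forbiddens
instance (teas : List String) (forbiddens : List String) (out : Int) : Decidable (Spec_count_complaints teas forbiddens out) := by unfold Spec_count_complaints; infer_instance

-- ===== CLAIM (what is proved, stated in full; the proofs are below) =====
def Claim_equal_count_complaints : Prop := ∀ (teas : List String) (forbiddens : List String), Dom_count_complaints teas forbiddens → Pre_count_complaints teas forbiddens → Spec_count_complaints teas forbiddens (count_complaints teas forbiddens)

-- ===== LEMMAS AND PROOFS =====

theorem pvMergeB_nil_left (ys : List (Int × List Char)) : pvMergeB [] ys = ys := by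
  cases ys <;> rw [pvMergeB]
theorem pvMergeB_nil_right (xs : List (Int × List Char)) : pvMergeB xs [] = xs := by
  cases xs <;> rw [pvMergeB]
theorem pvMergeB_cons_cons (x y : Int × List Char) (xs ys : List (Int × List Char)) :
    pvMergeB (x :: xs) (y :: ys) =
      if x.1 ≤ y.1 then x :: pvMergeB xs (y :: ys) else y :: pvMergeB (x :: xs) ys := by
  rw [pvMergeB]

theorem pvInsertBy_cons (bf : (Int × List Char) → (Int × List Char) → Bool) (z y : Int × List Char) (ys : List (Int × List Char)) :
    PySem.List.insertBy bf z (y :: ys) = if bf z y then z :: y :: ys else y :: PySem.List.insertBy bf z ys := by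
  rw [PySem.List.insertBy]

theorem pvInsertBy_nil (bf : (Int × List Char) → (Int × List Char) → Bool) (z : Int × List Char) :
    PySem.List.insertBy bf z [] = [z] := by
  rw [PySem.List.insertBy]

theorem pvMergeB_singleton_right (xs : List (Int × List Char)) (z : Int × List Char) :
    pvMergeB xs [z] = PySem.List.insertBy (fun u v => decide (u.1 < v.1)) z xs := by
  induction xs with
  | nil => rw [pvMergeB_nil_left, pvInsertBy_nil]
  | cons x xs ih =>
    rw [pvMergeB_cons_cons, pvInsertBy_cons, pvMergeB_nil_right, ih]
    by_cases hxz : x.1 ≤ z.1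
    · simp [hxz, not_lt.mpr hxz]
    · simp [hxz, lt_of_not_ge hxz]

theorem pvMergeB_snoc_right (xs ys : List (Int × List Char)) (z : Int × List Char)
    (h : ∀ y ∈ ys, y.1 ≤ z.1) :
    pvMergeB xs (ys ++ [z]) =
      PySem.List.insertBy (fun u v => decide (u.1 < v.1)) z (pvMergeB xs ys) := by
  induction xs, ys using pvMergeB.induct with
  | case1 ys =>
    rw [pvMergeB_nil_left, pvMergeB_nil_left,
      PySem.List.insertBy_of_forall_not_before _ _ _ (by intro y hy; simpa using not_lt.mpr (h y hy))]
  | case2 x xs =>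
    rw [pvMergeB_nil_right, List.nil_append, pvMergeB_singleton_right]
  | case3 x xs y ys hxy ih =>
    have hyz : y.1 ≤ z.1 := h y (List.mem_cons_self)
    simp only [List.cons_append] at ih ⊢
    rw [pvMergeB_cons_cons, if_pos hxy, pvMergeB_cons_cons, if_pos hxy,
      ih h, pvInsertBy_cons,
      if_neg (by simpa using not_lt.mpr (hxy.trans hyz))]
  | case4 x xs y ys hxy ih =>
    have hyz : y.1 ≤ z.1 := h y (List.mem_cons_self)
    simp only [List.cons_append] at ih ⊢
    rw [pvMergeB_cons_cons, if_neg hxy, pvMergeB_cons_cons, if_neg hxy,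
      ih (fun u hu => h u (List.mem_cons_of_mem _ hu)), pvInsertBy_cons,
      if_neg (by simpa using not_lt.mpr hyz)]

theorem pvMergeB_singleton_left (ys : List (Int × List Char)) (z : Int × List Char)
    (h2 : ∀ y ∈ ys, y.1 < z.1) :
    pvMergeB [z] ys = ys ++ [z] := by
  induction ys with
  | nil => rw [pvMergeB_nil_right]; rfl
  | cons y ys ih =>
    rw [pvMergeB_cons_cons, if_neg (not_le.mpr (h2 y List.mem_cons_self)),
      ih (fun u hu => h2 u (List.mem_cons_of_mem _ hu)), List.cons_append]

theorem pvMergeB_snoc_left (xs ys : List (Int × List Char)) (z : Int × List Char)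
    (h1 : ∀ x ∈ xs, x.1 ≤ z.1) (h2 : ∀ y ∈ ys, y.1 < z.1) :
    pvMergeB (xs ++ [z]) ys = pvMergeB xs ys ++ [z] := by
  induction xs, ys using pvMergeB.induct with
  | case1 ys =>
    rw [List.nil_append, pvMergeB_nil_left, pvMergeB_singleton_left ys z h2]
  | case2 x xs =>
    rw [pvMergeB_nil_right, pvMergeB_nil_right]
  | case3 x xs y ys hxy ih =>
    simp only [List.cons_append] at ih ⊢
    rw [pvMergeB_cons_cons, if_pos hxy, pvMergeB_cons_cons, if_pos hxy,
      ih (fun u hu => h1 u (List.mem_cons_of_mem _ hu)) h2]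
    rfl
  | case4 x xs y ys hxy ih =>
    simp only [List.cons_append] at ih ⊢
    rw [pvMergeB_cons_cons, if_neg hxy, pvMergeB_cons_cons, if_neg hxy,
      ih h1 (fun u hu => h2 u (List.mem_cons_of_mem _ hu))]
    rfl

theorem pvSorted_append_two (xs : List (Int × List Char)) (u v : Int × List Char) :
    PySem.List.sorted (xs ++ [u, v]) (fun st => st.1) =
      PySem.List.insertBy (fun p q => decide (p.1 < q.1)) v
        (PySem.List.insertBy (fun p q => decide (p.1 < q.1)) u
          (PySem.List.sorted xs (fun st => st.1))) := by
  rw [PySem.List.sorted_eq_foldl_insertBy, PySem.List.sorted_eq_foldl_insertBy, List.foldl_append]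
  rfl

theorem pvPairwise_expand (a : Int) (q : List (Int × List Char))
    (hq : q.Pairwise (fun u v => u.1 ≤ v.1)) :
    (q.flatMap (fun t => [(t.1 + a, t.2 ++ ['0']), (t.1 + a, t.2 ++ ['1'])])).Pairwise
      (fun u v => u.1 ≤ v.1) := by
  induction q with
  | nil => simp
  | cons t q ih =>
    rcases List.pairwise_cons.mp hq with ⟨hhead, htail⟩
    simp only [List.flatMap_cons, List.cons_append, List.nil_append]
    refine List.pairwise_cons.mpr ⟨?_, List.pairwise_cons.mpr ⟨?_, ih htail⟩⟩
    · intro u hu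
      rcases List.mem_cons.mp hu with h | h
      · simp [h]
      · rcases List.mem_flatMap.mp h with ⟨w, hw, hu2⟩
        have := hhead w hw
        simp only [List.mem_cons, List.not_mem_nil, or_false] at hu2
        rcases hu2 with rfl | rfl <;> simp <;> omega
    · intro u hu
      rcases List.mem_flatMap.mp hu with ⟨w, hw, hu2⟩
      have := hhead w hw
      simp only [List.mem_cons, List.not_mem_nil, or_false] at hu2
      rcases hu2 with rfl | rfl <;> simp <;> omega

theorem pvSorted_expand_eq' (a b : Int) (q : List (Int × List Char))
    (hq : q.Pairwise (fun u v => u.1 ≤ v.1)) :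
    PySem.List.sorted (q.flatMap (fun t => [(t.1 + a, t.2 ++ ['0']), (t.1 + b, t.2 ++ ['1'])]))
        (fun st => st.1) =
      if a = b then q.flatMap (fun t => [(t.1 + a, t.2 ++ ['0']), (t.1 + b, t.2 ++ ['1'])])
      else if a < b then
        pvMergeB (q.map (fun t => (t.1 + b, t.2 ++ ['1']))) (q.map (fun t => (t.1 + a, t.2 ++ ['0'])))
      else
        pvMergeB (q.map (fun t => (t.1 + a, t.2 ++ ['0']))) (q.map (fun t => (t.1 + b, t.2 ++ ['1']))) := by
  by_cases hab : a = b
  · subst hab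
    rw [if_pos rfl]
    exact PySem.List.sorted_eq_self_of_pairwise _ _ (pvPairwise_expand a q hq)
  · rw [if_neg hab]
    induction q using List.reverseRecOn with
    | nil =>
      by_cases hlt : a < b <;> simp [hlt, pvMergeB_nil_left, PySem.List.sorted]
    | append_singleton q' t ih =>
      rcases List.pairwise_append.mp hq with ⟨hq', -, hcross⟩
      have hle : ∀ u ∈ q', u.1 ≤ t.1 := fun u hu => hcross u hu t (by simp)
      have hmemX : ∀ u ∈ PySem.List.sorted
          (q'.flatMap (fun t => [(t.1 + a, t.2 ++ ['0']), (t.1 + b, t.2 ++ ['1'])]))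
          (fun st => st.1), u.1 ≤ t.1 + a ∨ u.1 ≤ t.1 + b := by
        intro u hu
        rw [PySem.List.mem_sorted] at hu
        rcases List.mem_flatMap.mp hu with ⟨w, hw, hu2⟩
        have := hle w hw
        simp only [List.mem_cons, List.not_mem_nil, or_false] at hu2
        rcases hu2 with rfl | rfl <;> simp <;> omega
      simp only [List.flatMap_append, List.flatMap_cons, List.flatMap_nil, List.append_nil,
        List.map_append, List.map_cons, List.map_nil]
      rw [pvSorted_append_two]
      have hS := ih hq'
      by_cases hlt : a < b
      · simp only [if_pos hlt]
        rw [if_pos hlt] at hS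
        have hz : ∀ y ∈ List.map (fun t => (t.1 + a, t.2 ++ ['0'])) q', y.1 ≤ (t.1 + a, t.2 ++ ['0']).1 := by
          intro y hy
          simp only [List.mem_map] at hy
          obtain ⟨u, hu, rfl⟩ := hy
          have := hle u hu
          simp; omega
        have ho1 : ∀ y ∈ List.map (fun t => (t.1 + b, t.2 ++ ['1'])) q', y.1 ≤ (t.1 + b, t.2 ++ ['1']).1 := by
          intro y hy
          simp only [List.mem_map] at hy
          obtain ⟨u, hu, rfl⟩ := hy
          have := hle u hu
          simp; omega
        have ho2 : ∀ y ∈ List.map (fun t => (t.1 + a, t.2 ++ ['0'])) q' ++ [(t.1 + a, t.2 ++ ['0'])],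
            y.1 < (t.1 + b, t.2 ++ ['1']).1 := by
          intro y hy
          rcases List.mem_append.mp hy with hy | hy
          · simp only [List.mem_map] at hy
            obtain ⟨u, hu, rfl⟩ := hy
            have := hle u hu
            simp; omega
          · simp only [List.mem_cons, List.not_mem_nil, or_false] at hy
            subst hy; simp; omega
        rw [pvMergeB_snoc_left _ _ _ ho1 ho2, pvMergeB_snoc_right _ _ _ hz, hS,
          PySem.List.insertBy_of_forall_not_before]
        intro y hy
        rcases (PySem.List.mem_insertBy _ _ _ _).mp hy with rfl | hy2
        · simp; omega
        · rw [← hS] at hy2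
          rcases hmemX y hy2 with h | h <;> simp <;> omega
      · simp only [if_neg hlt]
        rw [if_neg hlt] at hS
        have hz : ∀ y ∈ List.map (fun t => (t.1 + a, t.2 ++ ['0'])) q', y.1 ≤ (t.1 + a, t.2 ++ ['0']).1 := by
          intro y hy
          simp only [List.mem_map] at hy
          obtain ⟨u, hu, rfl⟩ := hy
          have := hle u hu
          simp; omega
        have ho1 : ∀ y ∈ List.map (fun t => (t.1 + b, t.2 ++ ['1'])) q', y.1 ≤ (t.1 + b, t.2 ++ ['1']).1 := by
          intro y hy
          simp only [List.mem_map] at hy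
          obtain ⟨u, hu, rfl⟩ := hy
          have := hle u hu
          simp; omega
        have ho2 : ∀ y ∈ List.map (fun t => (t.1 + b, t.2 ++ ['1'])) q',
            y.1 < (t.1 + a, t.2 ++ ['0']).1 := by
          intro y hy
          simp only [List.mem_map] at hy
          obtain ⟨u, hu, rfl⟩ := hy
          have := hle u hu
          simp; omega
        rw [pvMergeB_snoc_right _ _ _ ho1, pvMergeB_snoc_left _ _ _ hz ho2, hS]
        congr 1
        rw [PySem.List.insertBy_of_forall_not_before]
        intro y hy
        rcases hmemX y (by rw [hS]; exact hy) with h | h <;> simp <;> omega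

theorem pvScoresCellA_eq (teas : List String) (i : Int) :
    pvScoresCellA teas i =
      ((teas.countP (fun t => PySem.Str.pyGet? t i == some '0') : Int),
       (teas.length : Int) - (teas.countP (fun t => PySem.Str.pyGet? t i == some '0') : Int)) := by
  suffices h : ∀ (l : List String) (x y : Int),
      l.foldl (fun p t => if PySem.Str.pyGet? t i = some '0' then (p.1 + 1, p.2) else (p.1, p.2 + 1)) (x, y) =
        (x + (l.countP (fun t => PySem.Str.pyGet? t i == some '0') : Int),
         y + (l.length : Int) - (l.countP (fun t => PySem.Str.pyGet? t i == some '0') : Int)) by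
    have := h teas 0 0
    simpa [pvScoresCellA] using this
  intro l
  induction l with
  | nil => intro x y; simp
  | cons t l ih =>
    intro x y
    simp only [List.foldl_cons, List.countP_cons, List.length_cons]
    by_cases hc : PySem.Str.pyGet? t i = some '0'
    · rw [if_pos hc, ih]
      simp only [hc, beq_iff_eq, if_pos]
      rw [Prod.mk.injEq]
      constructor <;> (push_cast; ring)
    · rw [if_neg hc, ih]
      simp only [beq_iff_eq, hc, if_false]
      rw [Prod.mk.injEq]
      constructor <;> (push_cast; ring)

theorem pvZipFlatten (q : List (Int × List Char)) (f g : (Int × List Char) → (Int × List Char)) :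
    ((q.map f).zip (q.map g)).flatMap (fun p => [p.1, p.2]) = q.flatMap (fun t => [f t, g t]) := by
  induction q with
  | nil => rfl
  | cons t q ih => simp [ih]

theorem pvLoop_eq (scores : List (Int × Int)) (zeros : List Int) (n : Int) (cap : Nat)
    (c0 : Nat → Int) (L : Nat)
    (hA : ∀ j, j < L → (PySem.List.pyGet? scores ((((j + 1 : Nat) : Int)) - 1)).getD (0, 0) = (c0 j, n - c0 j))
    (hB : ∀ j, j < L → (PySem.List.pyGet? zeros ((j : Nat) : Int)).getD 0 = c0 j) :
    ∀ (m j : Nat) (queue : List (Int × List Char)), j + m ≤ L →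
      (∀ t ∈ queue, t.2.length = j) → queue.Pairwise (fun u v => u.1 ≤ v.1) →
      (List.range' j m).foldl
        (fun queue _i =>
          let next := queue.foldl (fun acc t => pvExpandA scores acc t) []
          (PySem.List.sorted next (fun st => st.1)).take cap) queue =
      (List.range' j m).foldl
        (fun (queue : List (Int × List Char)) (i : Nat) =>
          let c0v := (PySem.List.pyGet? zeros (i : Int)).getD 0
          let a := n - c0v
          let b := c0v
          let zs := queue.map (fun st => (st.1 + a, st.2 ++ ['0']))
          let os := queue.map (fun st => (st.1 + b, st.2 ++ ['1']))
          let merged :=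
            if a = b then (zs.zip os).flatMap (fun p => [p.1, p.2])
            else if a < b then pvMergeB os zs
            else pvMergeB zs os
          merged.take cap) queue := by
  intro m
  induction m with
  | zero => intro j queue _ _ _; rfl
  | succ m ih =>
    intro j queue hjm hlen hq
    have hjL : j < L := by omega
    rw [List.range'_succ, List.foldl_cons, List.foldl_cons]
    -- the two one-level steps agree
    have hnext : queue.foldl (fun acc t => pvExpandA scores acc t) [] =
        queue.flatMap (fun t => [(t.1 + (n - c0 j), t.2 ++ ['0']), (t.1 + c0 j, t.2 ++ ['1'])]) := by
      rw [PySem.List.foldl_congr_mem queue _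
        (fun acc t => acc ++ [(t.1 + (n - c0 j), t.2 ++ ['0']), (t.1 + c0 j, t.2 ++ ['1'])]) []
        ?_, PySem.List.foldl_append_eq_flatMap, List.nil_append]
      intro acc t ht
      show acc ++ _ = _
      have hlt : ((t.2 ++ ['0']).length : Int) - 1 = (((j + 1 : Nat) : Int)) - 1 := by
        simp [hlen t ht]
      rw [hlt, hA j hjL]
    have hstep :
        (PySem.List.sorted (queue.foldl (fun acc t => pvExpandA scores acc t) []) (fun st => st.1)).take cap =
        (let c0v := (PySem.List.pyGet? zeros ((j : Nat) : Int)).getD 0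
         let a := n - c0v
         let b := c0v
         let zs := queue.map (fun st => (st.1 + a, st.2 ++ ['0']))
         let os := queue.map (fun st => (st.1 + b, st.2 ++ ['1']))
         let merged :=
           if a = b then (zs.zip os).flatMap (fun p => [p.1, p.2])
           else if a < b then pvMergeB os zs
           else pvMergeB zs os
         merged.take cap) := by
      simp only [hB j hjL]
      rw [hnext, pvSorted_expand_eq' (n - c0 j) (c0 j) queue hq, pvZipFlatten]
    rw [hstep]
    -- invariants for the new queue
    set queue' :=
      (let c0v := (PySem.List.pyGet? zeros ((j : Nat) : Int)).getD 0
       let a := n - c0v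
       let b := c0v
       let zs := queue.map (fun st => (st.1 + a, st.2 ++ ['0']))
       let os := queue.map (fun st => (st.1 + b, st.2 ++ ['1']))
       let merged :=
         if a = b then (zs.zip os).flatMap (fun p => [p.1, p.2])
         else if a < b then pvMergeB os zs
         else pvMergeB zs os
       merged.take cap) with hq'
    have hform : queue' =
        (PySem.List.sorted (queue.flatMap
          (fun t => [(t.1 + (n - c0 j), t.2 ++ ['0']), (t.1 + c0 j, t.2 ++ ['1'])])) (fun st => st.1)).take cap := by
      rw [hq']
      simp only [hB j hjL]
      rw [pvSorted_expand_eq' (n - c0 j) (c0 j) queue hq, pvZipFlatten]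
    have hlen' : ∀ t ∈ queue', t.2.length = j + 1 := by
      intro t ht
      rw [hform] at ht
      have ht2 := List.mem_of_mem_take ht
      rw [PySem.List.mem_sorted] at ht2
      rcases List.mem_flatMap.mp ht2 with ⟨w, hw, hu2⟩
      simp only [List.mem_cons, List.not_mem_nil, or_false] at hu2
      rcases hu2 with rfl | rfl <;> simp [hlen w hw]
    have hpw' : queue'.Pairwise (fun u v => u.1 ≤ v.1) := by
      rw [hform]
      exact (PySem.List.sorted_pairwise _ _).sublist (List.take_sublist _ _)
    exact ih (j + 1) queue' (by omega) hlen' hpw'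

theorem pv_main (teas forbiddens : List String) :
    count_complaints teas forbiddens = count_complaints_alt teas forbiddens := by
  unfold count_complaints count_complaints_alt
  set L := (teas.headD "").toList.length with hL
  set c0 : Nat → Int := fun j => (teas.countP (fun t => PySem.Str.pyGet? t (j : Int) == some '0') : Int) with hc0
  have hA : ∀ j, j < L →
      (PySem.List.pyGet? (pvBuildScoresA teas) ((((j + 1 : Nat) : Int)) - 1)).getD (0, 0) =
        (c0 j, (teas.length : Int) - c0 j) := by
    intro j hj
    have hidx : (((j + 1 : Nat) : Int)) - 1 = ((j : Nat) : Int) := by push_cast; ring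
    rw [hidx, PySem.List.pyGet?_natCast]
    unfold pvBuildScoresA
    rw [← hL, PySem.List.pyRange_zero_natCast]
    simp only [List.map_map, List.getElem?_map, List.getElem?_range, hj]
    simp [Function.comp, pvScoresCellA_eq, hc0]
  have hB : ∀ j, j < L →
      (PySem.List.pyGet? ((List.range L).map
        (fun (i : Nat) => (teas.countP (fun t => PySem.Str.pyGet? t (i : Int) == some '0') : Int))) ((j : Nat) : Int)).getD 0 = c0 j := by
    intro j hj
    rw [PySem.List.pyGet?_natCast]
    simp only [List.getElem?_map, List.getElem?_range, hj]
    simp [hc0]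
  have hq := pvLoop_eq (pvBuildScoresA teas)
    ((List.range L).map (fun (i : Nat) => (teas.countP (fun t => PySem.Str.pyGet? t (i : Int) == some '0') : Int)))
    (teas.length : Int) ((PySem.Set.ofList (forbiddens.map String.toList)).length + 1) c0 L hA hB L 0
    [((0 : Int), ([] : List Char))] (by omega) (by intro t ht; simp at ht; simp [ht]) (by simp)
  rw [← List.range_eq_range'] at hq
  exact congrArg (fun q : List (Int × List Char) =>
    ((q.find? (fun st => !((PySem.Set.ofList (forbiddens.map String.toList)).contains st.2))).map
      (fun st => st.1)).getD 0) hq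

-- ===== VERDICT (by name: the statement is the Claim_ definition above) =====
theorem count_complaints_spec : Claim_equal_count_complaints := by
  intro teas forbiddens _dom _pre
  unfold Spec_count_complaints
  exact pv_main teas forbiddens
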